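-- pv_equiv track=rewrite | github.com/DustySprout/Algo_and_structures | src/dinamic_prog.py | building_positions
-- ===== SOURCE A (Python) =====
-- from typing import List, Tuple, Dict
--
-- def building_positions(matrix: List[List[str]], rows: int, cols: int) -> Dict[str, List[Tuple[int, int]]]:
--     letter_positions = {}
--     for x in range(rows):
--         for y in range(cols):
--             letter = matrix[x][y]
--             if letter not in letter_positions:
--                 letter_positions[letter] = []
--             letter_positions[letter].append((x, y))
--     return letter_positions
-- ===== SOURCE B (Python) =====
-- def building_positions(matrix, rows, cols):
--     # Flatten to (letter, (x, y)) cells in row-major order, collect distinct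
--     # letters in first-appearance order, then build each group by one filter pass.
--     cells = [(matrix[x][y], (x, y)) for x in range(rows) for y in range(cols)]
--     letters = []
--     for letter, _ in cells:
--         if letter not in letters:
--             letters.append(letter)
--     return {L: [pos for l, pos in cells if l == L] for L in letters}
-- ===== Notes on version B (the rewrite author's own statement) =====
-- stated objective: alternative
-- what changed: Replaces single-pass dict accumulation (create-empty-then-append per cell) with a flatten-to-cells pass, a distinct-letter pass, and one filter pass per letter building each group wholesale.
import Mathlib
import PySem

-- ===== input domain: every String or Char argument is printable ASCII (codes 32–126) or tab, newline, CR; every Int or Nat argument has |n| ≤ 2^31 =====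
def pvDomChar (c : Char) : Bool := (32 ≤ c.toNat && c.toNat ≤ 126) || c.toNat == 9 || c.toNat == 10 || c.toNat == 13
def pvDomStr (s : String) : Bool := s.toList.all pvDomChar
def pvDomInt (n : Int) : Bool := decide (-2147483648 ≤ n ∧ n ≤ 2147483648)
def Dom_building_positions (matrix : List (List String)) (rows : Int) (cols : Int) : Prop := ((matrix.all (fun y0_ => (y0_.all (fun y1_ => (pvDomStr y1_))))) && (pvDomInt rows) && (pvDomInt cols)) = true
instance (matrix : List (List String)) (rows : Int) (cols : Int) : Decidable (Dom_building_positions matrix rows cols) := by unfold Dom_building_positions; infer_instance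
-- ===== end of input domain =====

-- B replaces A's single-pass dict accumulation with flatten / distinct-letters / one filter pass per letter (alternative decomposition, not faster).

-- ===== PORT A =====
-- letter = matrix[x][y]; total via pyGetD, exact under Pre_ (indices in range)
def building_positions (matrix : List (List String)) (rows : Int) (cols : Int) : List (String × List (Int × Int)) :=
  ((PySem.List.pyRange 0 rows 1).foldl (fun d x =>
    (PySem.List.pyRange 0 cols 1).foldl (fun d y =>
      let letter := PySem.List.pyGetD (PySem.List.pyGetD matrix x []) y ""
      let d := if d.contains letter then d else d.insert letter []   -- if letter not in letter_positions: … = []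
      d.modify letter [] (fun ps => ps ++ [(x, y)])                  -- letter_positions[letter].append((x, y))
      ) d) PySem.Dict.empty).items

-- ===== PORT B =====
def building_positions_alt (matrix : List (List String)) (rows : Int) (cols : Int) : List (String × List (Int × Int)) :=
  let cells := (PySem.List.pyRange 0 rows 1).flatMap (fun x =>
    (PySem.List.pyRange 0 cols 1).map (fun y =>
      (PySem.List.pyGetD (PySem.List.pyGetD matrix x []) y "", (x, y))))
  let letters := cells.foldl (fun ks c => if ks.contains c.1 then ks else ks ++ [c.1]) []
  letters.map (fun L => (L, (cells.filter (fun c => c.1 == L)).map (·.2)))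

-- ===== PRECONDITION & SPEC =====
-- Pre_: exactly the inputs where every access matrix[x][y] (x < rows, y < cols) is in range
-- (otherwise Python A raises IndexError); if cols ≤ 0 the inner loop is empty and nothing is indexed.
def Pre_building_positions (matrix : List (List String)) (rows : Int) (cols : Int) : Prop :=
  cols ≤ 0 ∨ (rows ≤ (matrix.length : Int) ∧ ∀ row ∈ matrix.take rows.toNat, cols ≤ (row.length : Int))
instance (matrix : List (List String)) (rows : Int) (cols : Int) : Decidable (Pre_building_positions matrix rows cols) := by unfold Pre_building_positions; infer_instance
def pvWitness_building_positions : List (List String) × Int × Int := ([["a", "b"], ["b", "a"]], 2, 2)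

def Spec_building_positions (matrix : List (List String)) (rows : Int) (cols : Int) (out : List (String × List (Int × Int))) : Prop := out = building_positions_alt matrix rows cols
instance (matrix : List (List String)) (rows : Int) (cols : Int) (out : List (String × List (Int × Int))) : Decidable (Spec_building_positions matrix rows cols out) := by unfold Spec_building_positions; infer_instance

-- ===== CLAIM (what is proved, stated in full; the proofs are below) =====
def Claim_equal_building_positions : Prop := ∀ (matrix : List (List String)) (rows : Int) (cols : Int), Dom_building_positions matrix rows cols → Pre_building_positions matrix rows cols → Spec_building_positions matrix rows cols (building_positions matrix rows cols)

-- ===== LEMMAS AND PROOFS =====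

-- A's loop body equals a plain 'modify' step on the dict.
theorem stepA_eq_modify (d : PySem.Dict String (List (Int × Int))) (k : String) (p : Int × Int) :
    (let d := if d.contains k then d else d.insert k []
     d.modify k [] (fun ps => ps ++ [p])) = d.modify k [] (fun ps => ps ++ [p]) := by
  by_cases h : d.contains k
  · simp [h]
  · simp only [h, if_false, Bool.false_eq_true]
    simp only [PySem.Dict.modify, PySem.Dict.getD_insert_self, PySem.Dict.insert_insert_self]
    have hc : d.contains k = false := by simpa using h
    rw [PySem.Dict.getD_of_not_contains (d := d) (k := k) [] hc]

-- Nested range foldl = foldl over the flattened cell list.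
theorem foldl_nested_eq_cells (matrix : List (List String)) (rows cols : Int)
    (d : PySem.Dict String (List (Int × Int))) :
    (PySem.List.pyRange 0 rows 1).foldl (fun d x =>
      (PySem.List.pyRange 0 cols 1).foldl (fun d y =>
        d.modify (PySem.List.pyGetD (PySem.List.pyGetD matrix x []) y "") [] (fun ps => ps ++ [(x, y)])) d) d
    = ((PySem.List.pyRange 0 rows 1).flatMap (fun x =>
        (PySem.List.pyRange 0 cols 1).map (fun y =>
          (PySem.List.pyGetD (PySem.List.pyGetD matrix x []) y "", (x, y))))).foldl
        (fun d c => d.modify c.1 [] (fun ps => ps ++ [c.2])) d := by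
  induction (PySem.List.pyRange 0 rows 1) generalizing d with
  | nil => rfl
  | cons x xs ih => simp [List.flatMap_cons, List.foldl_append, List.foldl_map, ih]

theorem building_positions_spec : Claim_equal_building_positions := by
  intro matrix rows cols _ _
  unfold Spec_building_positions building_positions building_positions_alt
  simp only [stepA_eq_modify]
  rw [foldl_nested_eq_cells]
  set cells := (PySem.List.pyRange 0 rows 1).flatMap (fun x =>
    (PySem.List.pyRange 0 cols 1).map (fun y =>
      (PySem.List.pyGetD (PySem.List.pyGetD matrix x []) y "", (x, y)))) with hcells
  have hnodup : (cells.foldl (fun d c => d.modify c.1 [] (fun ps => ps ++ [c.2])) PySem.Dict.empty).keys.Nodup := by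
    exact PySem.Dict.nodup_keys_foldl_modify_key cells Prod.fst [] (fun d c => (fun ps => ps ++ [c.2])) PySem.Dict.empty (by simp)
  rw [PySem.Dict.items_eq_map_keys _ hnodup []]
  rw [PySem.Dict.keys_foldl_modify_key]
  have hkeys : PySem.Set.update (PySem.Dict.empty : PySem.Dict String (List (Int × Int))).keys (cells.map Prod.fst)
      = cells.foldl (fun ks c => if ks.contains c.1 then ks else ks ++ [c.1]) [] := by
    simp [PySem.Dict.keys_empty, PySem.Set.update, List.foldl_map, PySem.Set.add]
  rw [hkeys]
  apply List.map_congr_left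
  intro L _
  refine congrArg (fun v => (L, v)) ?_
  rw [PySem.Dict.getD_foldl_modify_append]
  simp
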